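-- pv_equiv track=rewrite | github.com/danek2104/Symmetric_ciphers | ecryption.py | affine_break
-- ===== SOURCE A (Python) =====
-- def mod_inverse(a, m=26):
--     """Находит обратное число a по модулю m."""
--     for inv in range(1, m):
--         if (a * inv) % m == 1:
--             return inv
--     raise ValueError(f"Обратного числа для {a} mod {m} не существует")
--
-- def affine_decrypt(ciphertext, a, b):
--     """Дешифрует текст, зашифрованный аффинным шифром."""
--     a_inv = mod_inverse(a)
--     decrypted = []
--     for char in ciphertext:
--         if char.isupper():
--             y = ord(char) - ord('A')
--             x = (a_inv * (y - b)) % 26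
--             decrypted.append(chr(x + ord('A')))
--         elif char.islower():
--             y = ord(char) - ord('a')
--             x = (a_inv * (y - b)) % 26
--             decrypted.append(chr(x + ord('a')))
--         else:
--             decrypted.append(char)
--     return ''.join(decrypted)
--
-- def affine_break(ciphertext):
--     """Восстанавливает исходный текст без знания ключа с помощью частотного анализа."""
--     from collections import Counter
--     # Эталонные частоты букв английского языка (в порядке убывания)
--     freq_eng = 'ETAOINSHRDLCUMWFGYPBVKJXQZ'
--
--     # Фильтруем только буквы и приводим к верхнему регистру
--     letters = [char.upper() for char in ciphertext if char.isalpha()]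
--     if not letters:
--         return ciphertext
--
--     # Находим две самые частые буквы в тексте
--     counter = Counter(letters)
--     common = [char for char, _ in counter.most_common(2)]
--
--     # Возможные значения для a (взаимно простые с 26)
--     valid_a = [1, 3, 5, 7, 9, 11, 15, 17, 19, 21, 23, 25]
--     best_guess = None
--     best_score = -1
--
--     # Перебираем все возможные пары (a, b)
--     for a in valid_a:
--         a_inv = mod_inverse(a)
--         for b in range(26):
--             # Пробуем дешифровать
--             decrypted = affine_decrypt(ciphertext, a, b)
--             # Оцениваем качество текста по частотному анализу
--             decrypted_letters = [char.upper() for char in decrypted if char.isalpha()]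
--             decrypted_freq = Counter(decrypted_letters)
--             # Сортируем буквы по частоте в тексте
--             sorted_letters = ''.join([char for char, _ in decrypted_freq.most_common()])
--             # Сравниваем с эталоном (первые 6 букв)
--             score = sum(1 for letter in sorted_letters[:6] if letter in freq_eng[:6])
--             if score > best_score:
--                 best_score = score
--                 best_guess = decrypted
--
--     return best_guess
-- ===== SOURCE B (Python) =====
-- def affine_break(ciphertext):
--     """Same break, but the per-key frequency scoring is done on the letter counts
--     (counted once), and the full text is decrypted only once, for the winning key."""
--     from collections import Counter
--     freq_top = set('ETAOIN')
--     letters = [c.upper() for c in ciphertext if c.isalpha()]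
--     if not letters:
--         return ciphertext
--     items = list(Counter(letters).items())
--     best_key = None
--     best_score = -1
--     # the 12 valid a values, paired with their inverses mod 26
--     for a, a_inv in ((1, 1), (3, 9), (5, 21), (7, 15), (9, 3), (11, 19),
--                      (15, 7), (17, 23), (19, 11), (21, 5), (23, 17), (25, 25)):
--         for b in range(26):
--             mapped = [(chr((a_inv * (ord(ch) - 65 - b)) % 26 + 65), n) for ch, n in items]
--             mapped.sort(key=lambda p: p[1], reverse=True)
--             score = sum(1 for ch, _ in mapped[:6] if ch in freq_top)
--             if score > best_score:
--                 best_score = score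
--                 best_key = (a_inv, b)
--     a_inv, b = best_key
--     out = []
--     for ch in ciphertext:
--         if ch.isupper():
--             out.append(chr((a_inv * (ord(ch) - 65 - b)) % 26 + 65))
--         elif ch.islower():
--             out.append(chr((a_inv * (ord(ch) - 97 - b)) % 26 + 97))
--         else:
--             out.append(ch)
--     return ''.join(out)
-- ===== Notes on version B (the rewrite author's own statement) =====
-- stated objective: faster
-- what changed: Instead of decrypting and re-counting the whole text for each of the 312 keys, B counts the ciphertext letters once and scores each key by permuting that one counter (decryption permutes letters, so counts just move); only the winning key decrypts the full text, and the modular inverses are a literal table instead of a search loop.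
import Mathlib
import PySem

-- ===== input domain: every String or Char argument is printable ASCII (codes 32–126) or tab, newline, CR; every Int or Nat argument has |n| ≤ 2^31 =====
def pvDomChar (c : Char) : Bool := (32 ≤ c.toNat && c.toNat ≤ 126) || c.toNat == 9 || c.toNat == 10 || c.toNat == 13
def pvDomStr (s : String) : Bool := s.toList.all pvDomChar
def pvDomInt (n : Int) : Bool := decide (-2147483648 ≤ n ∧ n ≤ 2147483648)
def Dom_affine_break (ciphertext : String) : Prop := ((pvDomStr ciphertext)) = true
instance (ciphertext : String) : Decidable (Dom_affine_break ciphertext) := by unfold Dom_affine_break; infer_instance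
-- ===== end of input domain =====

-- B speeds A up: the ciphertext letters are counted once and each key is scored on the
-- permuted counts; the full text is decrypted only once, for the winning key.

-- ===== PORT A =====
-- mod_inverse: the for-loop with early return; the ValueError branch is unreachable for
-- the coprime a this program calls it with, rendered as .getD 0.
def pvModInverse (a : Int) : Int :=
  (((PySem.List.pyRange 1 26 1).find? (fun inv => PySem.Int.mod (a * inv) 26 == 1)).getD 0)

def pvAffineDecrypt (ct : List Char) (a b : Int) : List Char :=
  let aInv := pvModInverse a
  ct.map (fun ch =>
    if PySem.Chars.isupper ch then
      Char.ofNat ((PySem.Int.mod (aInv * (((ch.toNat : Int) - 65) - b)) 26).toNat + 65)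
    else if PySem.Chars.islower ch then
      Char.ofNat ((PySem.Int.mod (aInv * (((ch.toNat : Int) - 97) - b)) 26).toNat + 97)
    else ch)

-- freq_eng[:6]
def pvScoreLetters : List Char := ['E', 'T', 'A', 'O', 'I', 'N']

def pvValidA : List Int := [1, 3, 5, 7, 9, 11, 15, 17, 19, 21, 23, 25]

def affine_break (ciphertext : String) : String :=
  let ct := ciphertext.toList
  let letters := (ct.filter (fun c => PySem.Chars.isalpha c)).map PySem.Chars.upperChar
  if letters = [] then ciphertext
  else
    let counter := PySem.Dict.counter letters
    -- counter.most_common(2) (heapq.nlargest, documented equivalent to sorted(...)[:2]); unused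
    let _common := ((PySem.List.sorted counter.items (fun p => p.2) true).take 2).map (·.1)
    let st :=
      pvValidA.foldl (fun st a =>
        let _aInv := pvModInverse a
        (PySem.List.pyRange 0 26 1).foldl (fun st b =>
          let decrypted := pvAffineDecrypt ct a b
          let decLetters := (decrypted.filter (fun c => PySem.Chars.isalpha c)).map PySem.Chars.upperChar
          let freq := PySem.Dict.counter decLetters
          let sortedLetters := (PySem.List.sorted freq.items (fun p => p.2) true).map (·.1)
          let score : Int := (((sortedLetters.take 6).filter (fun c => pvScoreLetters.contains c)).length : Int)
          if score > st.2 then (some decrypted, score) else st) st)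
        ((none : Option (List Char)), (-1 : Int))
    -- best_guess is always set here: letters ≠ [] and the key loop is nonempty
    String.mk (st.1.getD [])

-- ===== PORT B =====
def pvFreqTop : PySem.Set Char := PySem.Set.ofList ['E', 'T', 'A', 'O', 'I', 'N']

def pvPairsB : List (Int × Int) :=
  [(1, 1), (3, 9), (5, 21), (7, 15), (9, 3), (11, 19),
   (15, 7), (17, 23), (19, 11), (21, 5), (23, 17), (25, 25)]

def pvDecodeB (ct : List Char) (aInv b : Int) : List Char :=
  ct.map (fun ch =>
    if PySem.Chars.isupper ch then
      Char.ofNat ((PySem.Int.mod (aInv * (((ch.toNat : Int) - 65) - b)) 26).toNat + 65)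
    else if PySem.Chars.islower ch then
      Char.ofNat ((PySem.Int.mod (aInv * (((ch.toNat : Int) - 97) - b)) 26).toNat + 97)
    else ch)

def affine_break_alt (ciphertext : String) : String :=
  let ct := ciphertext.toList
  let letters := (ct.filter (fun c => PySem.Chars.isalpha c)).map PySem.Chars.upperChar
  if letters = [] then ciphertext
  else
    let items := (PySem.Dict.counter letters).items
    let st :=
      pvPairsB.foldl (fun st p =>
        (PySem.List.pyRange 0 26 1).foldl (fun st b =>
          let mapped := items.map (fun q =>
            (Char.ofNat ((PySem.Int.mod (p.2 * (((q.1.toNat : Int) - 65) - b)) 26).toNat + 65), q.2))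
          let mappedS := PySem.List.sorted mapped (fun q => q.2) true
          let score : Int := (((mappedS.take 6).filter (fun q => PySem.Set.contains pvFreqTop q.1)).length : Int)
          if score > st.2 then (some (p.2, b), score) else st) st)
        ((none : Option (Int × Int)), (-1 : Int))
    match st.1 with
    -- unreachable: letters ≠ [] and the key loop is nonempty, so best_key was set
    | none => ciphertext
    | some (aInv, b) => String.mk (pvDecodeB ct aInv b)

-- ===== PRECONDITION & SPEC =====
def Spec_affine_break (ciphertext : String) (out : String) : Prop := out = affine_break_alt ciphertext
instance (ciphertext : String) (out : String) : Decidable (Spec_affine_break ciphertext out) := by unfold Spec_affine_break; infer_instance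

-- ===== CLAIM (what is proved, stated in full; the proofs are below) =====
def Claim_equal_affine_break : Prop := ∀ (ciphertext : String), Dom_affine_break ciphertext → Spec_affine_break ciphertext (affine_break ciphertext)

-- ===== LEMMAS AND PROOFS =====

def pvF (aInv b : Int) (c : Char) : Char :=
  Char.ofNat ((PySem.Int.mod (aInv * (((c.toNat : Int) - 65) - b)) 26).toNat + 65)

def pvDecChar (aInv b : Int) (ch : Char) : Char :=
  if PySem.Chars.isupper ch then
    Char.ofNat ((PySem.Int.mod (aInv * (((ch.toNat : Int) - 65) - b)) 26).toNat + 65)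
  else if PySem.Chars.islower ch then
    Char.ofNat ((PySem.Int.mod (aInv * (((ch.toNat : Int) - 97) - b)) 26).toNat + 97)
  else ch

def pvLetters (ct : List Char) : List Char :=
  (ct.filter (fun c => PySem.Chars.isalpha c)).map PySem.Chars.upperChar

theorem pvCharLe (c d : Char) : (c ≤ d) ↔ (c.toNat ≤ d.toNat) := by
  rw [Char.le_def, UInt32.le_iff_toNat_le]; exact Iff.rfl

theorem pvCharEq (c d : Char) (h : c.toNat = d.toNat) : c = d := by
  have := congrArg Char.ofNat h
  rwa [Char.ofNat_toNat, Char.ofNat_toNat] at this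

theorem pvCharOf (n : Nat) (h : n < 55296) : (Char.ofNat n).toNat = n := by
  rw [Char.toNat_ofNat, if_pos]; left; omega

theorem pvIsupper_iff (c : Char) : PySem.Chars.isupper c = true ↔ (65 ≤ c.toNat ∧ c.toNat ≤ 90) := by
  show (decide ('A' ≤ c) && decide (c ≤ 'Z')) = true ↔ _
  simp only [Bool.and_eq_true, decide_eq_true_eq, pvCharLe]
  exact Iff.rfl

theorem pvIslower_iff (c : Char) : PySem.Chars.islower c = true ↔ (97 ≤ c.toNat ∧ c.toNat ≤ 122) := by
  show (decide ('a' ≤ c) && decide (c ≤ 'z')) = true ↔ _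
  simp only [Bool.and_eq_true, decide_eq_true_eq, pvCharLe]
  exact Iff.rfl

theorem pvMod26 (x : Int) : 0 ≤ PySem.Int.mod x 26 ∧ PySem.Int.mod x 26 < 26 :=
  ⟨PySem.Int.mod_nonneg x (by norm_num), PySem.Int.mod_lt x (by norm_num)⟩

theorem pvF_toNat (aInv b : Int) (c : Char) :
    (pvF aInv b c).toNat = (PySem.Int.mod (aInv * (((c.toNat : Int) - 65) - b)) 26).toNat + 65 := by
  have h := pvMod26 (aInv * (((c.toNat : Int) - 65) - b))
  exact pvCharOf _ (by omega)

theorem pvF_inj (aInv b : Int) (hg : Int.gcd aInv 26 = 1) (c1 c2 : Char)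
    (h1 : 65 ≤ c1.toNat ∧ c1.toNat ≤ 90) (h2 : 65 ≤ c2.toNat ∧ c2.toNat ≤ 90)
    (he : pvF aInv b c1 = pvF aInv b c2) : c1 = c2 := by
  have ht := congrArg Char.toNat he
  rw [pvF_toNat, pvF_toNat] at ht
  have hm1 := pvMod26 (aInv * (((c1.toNat : Int) - 65) - b))
  have hm2 := pvMod26 (aInv * (((c2.toNat : Int) - 65) - b))
  have hmm : PySem.Int.mod (aInv * (((c1.toNat : Int) - 65) - b)) 26
      = PySem.Int.mod (aInv * (((c2.toNat : Int) - 65) - b)) 26 := by omega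
  rw [PySem.Int.mod_eq_emod_of_pos (by norm_num), PySem.Int.mod_eq_emod_of_pos (by norm_num)] at hmm
  have hdvd : (26 : Int) ∣ (aInv * (((c2.toNat : Int) - 65) - b)) - (aInv * (((c1.toNat : Int) - 65) - b)) :=
    Int.ModEq.dvd hmm
  have hdvd2 : (26 : Int) ∣ aInv * ((c2.toNat : Int) - (c1.toNat : Int)) := by
    have : (aInv * (((c2.toNat : Int) - 65) - b)) - (aInv * (((c1.toNat : Int) - 65) - b))
        = aInv * ((c2.toNat : Int) - (c1.toNat : Int)) := by ring
    rwa [this] at hdvd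
  have hc : IsCoprime (26 : Int) aInv := by
    rw [Int.isCoprime_iff_gcd_eq_one, Int.gcd_comm]; exact hg
  have hdvd3 : (26 : Int) ∣ (c2.toNat : Int) - (c1.toNat : Int) := hc.dvd_of_dvd_mul_left hdvd2
  obtain ⟨k, hk⟩ := hdvd3
  exact pvCharEq _ _ (by omega)

theorem pvUpper_up (c : Char) (h : PySem.Chars.isalpha c = true) :
    65 ≤ (PySem.Chars.upperChar c).toNat ∧ (PySem.Chars.upperChar c).toNat ≤ 90 := by
  have : (PySem.Chars.isupper c || PySem.Chars.islower c) = true := h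
  rcases Bool.or_eq_true_iff.mp this with hu | hl
  · have hub := (pvIsupper_iff c).mp hu
    have hlf : PySem.Chars.islower c = false := by
      rw [Bool.eq_false_iff]; intro hc
      have := (pvIslower_iff c).mp hc; omega
    unfold PySem.Chars.upperChar; rw [hlf]; simpa using hub
  · have hlb := (pvIslower_iff c).mp hl
    unfold PySem.Chars.upperChar; rw [hl]; simp only [if_true]
    rw [pvCharOf _ (by omega)]; omega

theorem pvLetters_up (ct : List Char) : ∀ x ∈ pvLetters ct, 65 ≤ x.toNat ∧ x.toNat ≤ 90 := by
  intro x hx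
  simp only [pvLetters, List.mem_map, List.mem_filter] at hx
  obtain ⟨c, ⟨_, hc⟩, rfl⟩ := hx
  exact pvUpper_up c hc

theorem pvAlpha_dec (aInv b : Int) (ch : Char) :
    PySem.Chars.isalpha (pvDecChar aInv b ch) = PySem.Chars.isalpha ch := by
  unfold pvDecChar
  by_cases hu : PySem.Chars.isupper ch = true
  · rw [if_pos hu]
    have h := pvMod26 (aInv * (((ch.toNat : Int) - 65) - b))
    have ht := pvCharOf ((PySem.Int.mod (aInv * (((ch.toNat : Int) - 65) - b)) 26).toNat + 65) (by omega)
    have : PySem.Chars.isupper (Char.ofNat ((PySem.Int.mod (aInv * (((ch.toNat : Int) - 65) - b)) 26).toNat + 65)) = true := by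
      rw [pvIsupper_iff, ht]; omega
    unfold PySem.Chars.isalpha
    rw [this, hu]; rfl
  · rw [if_neg hu]
    by_cases hl : PySem.Chars.islower ch = true
    · rw [if_pos hl]
      have h := pvMod26 (aInv * (((ch.toNat : Int) - 97) - b))
      have ht := pvCharOf ((PySem.Int.mod (aInv * (((ch.toNat : Int) - 97) - b)) 26).toNat + 97) (by omega)
      have : PySem.Chars.islower (Char.ofNat ((PySem.Int.mod (aInv * (((ch.toNat : Int) - 97) - b)) 26).toNat + 97)) = true := by
        rw [pvIslower_iff, ht]; omega
      unfold PySem.Chars.isalpha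
      rw [this, hl]; simp
    · rw [if_neg hl]

theorem pvUpper_dec (aInv b : Int) (ch : Char) (h : PySem.Chars.isalpha ch = true) :
    PySem.Chars.upperChar (pvDecChar aInv b ch) = pvF aInv b (PySem.Chars.upperChar ch) := by
  have halpha : (PySem.Chars.isupper ch || PySem.Chars.islower ch) = true := h
  by_cases hu : PySem.Chars.isupper ch = true
  · have hub := (pvIsupper_iff ch).mp hu
    have hlf : PySem.Chars.islower ch = false := by
      rw [Bool.eq_false_iff]; intro hc
      have := (pvIslower_iff ch).mp hc; omega
    have huc : PySem.Chars.upperChar ch = ch := by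
      unfold PySem.Chars.upperChar; rw [hlf]; simp
    have hm := pvMod26 (aInv * (((ch.toNat : Int) - 65) - b))
    have hdl : PySem.Chars.islower (pvDecChar aInv b ch) = false := by
      unfold pvDecChar; rw [if_pos hu, Bool.eq_false_iff]; intro hc
      have := (pvIslower_iff _).mp hc
      rw [pvCharOf _ (by omega)] at this; omega
    rw [huc]
    have hdc : pvDecChar aInv b ch = pvF aInv b ch := by unfold pvDecChar pvF; rw [if_pos hu]
    rw [hdc] at hdl ⊢
    unfold PySem.Chars.upperChar; rw [hdl]; simp
  · rcases Bool.or_eq_true_iff.mp halpha with h' | hl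
    · exact absurd h' hu
    · have hlb := (pvIslower_iff ch).mp hl
      have hm := pvMod26 (aInv * (((ch.toNat : Int) - 97) - b))
      -- decoded char is lowercase
      have ht97 : (Char.ofNat ((PySem.Int.mod (aInv * (((ch.toNat : Int) - 97) - b)) 26).toNat + 97)).toNat
          = (PySem.Int.mod (aInv * (((ch.toNat : Int) - 97) - b)) 26).toNat + 97 := pvCharOf _ (by omega)
      have hdl : PySem.Chars.islower (pvDecChar aInv b ch) = true := by
        unfold pvDecChar; rw [if_neg hu, if_pos hl, pvIslower_iff, ht97]; omega
      have hdc : pvDecChar aInv b ch = Char.ofNat ((PySem.Int.mod (aInv * (((ch.toNat : Int) - 97) - b)) 26).toNat + 97) := by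
        unfold pvDecChar; rw [if_neg hu, if_pos hl]
      -- LHS
      have hlhs : (PySem.Chars.upperChar (pvDecChar aInv b ch)).toNat
          = (PySem.Int.mod (aInv * (((ch.toNat : Int) - 97) - b)) 26).toNat + 65 := by
        unfold PySem.Chars.upperChar; rw [hdl]; simp only [if_true]
        rw [hdc, ht97, pvCharOf _ (by omega)]; omega
      -- RHS
      have huc : PySem.Chars.upperChar ch = Char.ofNat (ch.toNat - 32) := by
        unfold PySem.Chars.upperChar; rw [hl]; simp
      have hut : (PySem.Chars.upperChar ch).toNat = ch.toNat - 32 := by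
        rw [huc, pvCharOf _ (by omega)]
      have harg : ((PySem.Chars.upperChar ch).toNat : Int) - 65 - b = ((ch.toNat : Int) - 97) - b := by
        rw [hut]; push_cast [Nat.cast_sub (by omega : 32 ≤ ch.toNat)]; ring
      have hrhs : (pvF aInv b (PySem.Chars.upperChar ch)).toNat
          = (PySem.Int.mod (aInv * (((ch.toNat : Int) - 97) - b)) 26).toNat + 65 := by
        rw [pvF_toNat, harg]
      apply pvCharEq; rw [hlhs, hrhs]

theorem pvDec_letters (aInv b : Int) (ct : List Char) :
    pvLetters (ct.map (pvDecChar aInv b)) = (pvLetters ct).map (pvF aInv b) := by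
  unfold pvLetters
  rw [List.filter_map, List.map_map, List.map_map]
  have hf : ct.filter (fun c => PySem.Chars.isalpha (pvDecChar aInv b c))
      = ct.filter (fun c => PySem.Chars.isalpha c) := by
    apply List.filter_congr; intro x _; simp [pvAlpha_dec]
  rw [show ((fun c => PySem.Chars.isalpha c) ∘ pvDecChar aInv b) = (fun c => PySem.Chars.isalpha (pvDecChar aInv b c)) from rfl, hf]
  apply List.map_congr_left
  intro x hx
  have hxa : PySem.Chars.isalpha x = true := (List.mem_filter.mp hx).2
  exact pvUpper_dec aInv b x hxa

-- Set.ofList commutes with an injective-on-the-letters map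
theorem pvSet_add_map (aInv b : Int) (hg : Int.gcd aInv 26 = 1) (s : List Char) (x : Char)
    (hs : ∀ y ∈ s, 65 ≤ y.toNat ∧ y.toNat ≤ 90) (hx : 65 ≤ x.toNat ∧ x.toNat ≤ 90) :
    PySem.Set.add (s.map (pvF aInv b)) (pvF aInv b x) = (PySem.Set.add s x).map (pvF aInv b) := by
  have hmem : (s.map (pvF aInv b)).contains (pvF aInv b x) = s.contains x := by
    rw [Bool.eq_iff_iff]
    simp only [List.contains_iff_mem, List.mem_map]
    constructor
    · rintro ⟨y, hy, hyx⟩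
      exact (pvF_inj aInv b hg y x (hs y hy) hx hyx) ▸ hy
    · exact fun h => ⟨x, h, rfl⟩
  unfold PySem.Set.add PySem.Set.contains
  rw [hmem]
  by_cases h : s.contains x = true
  · rw [if_pos h, if_pos h]
  · rw [if_neg h, if_neg h, List.map_append]; rfl

theorem pvSet_foldl_map (aInv b : Int) (hg : Int.gcd aInv 26 = 1) :
    ∀ (l s : List Char), (∀ y ∈ l, 65 ≤ y.toNat ∧ y.toNat ≤ 90) → (∀ y ∈ s, 65 ≤ y.toNat ∧ y.toNat ≤ 90) →
    (l.map (pvF aInv b)).foldl PySem.Set.add (s.map (pvF aInv b)) = (l.foldl PySem.Set.add s).map (pvF aInv b)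
  | [], s, _, _ => rfl
  | x :: l, s, hl, hs => by
    simp only [List.map_cons, List.foldl_cons]
    rw [pvSet_add_map aInv b hg s x hs (hl x (List.mem_cons_self))]
    exact pvSet_foldl_map aInv b hg l (PySem.Set.add s x)
      (fun y hy => hl y (List.mem_cons_of_mem _ hy))
      (fun y hy => by
        rcases (PySem.Set.mem_add s x y).mp hy with h | h
        · exact hs y h
        · exact h ▸ hl x (List.mem_cons_self))

theorem pvSet_ofList_map (aInv b : Int) (hg : Int.gcd aInv 26 = 1) (l : List Char)
    (hl : ∀ y ∈ l, 65 ≤ y.toNat ∧ y.toNat ≤ 90) :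
    PySem.Set.ofList (l.map (pvF aInv b)) = (PySem.Set.ofList l).map (pvF aInv b) := by
  rw [PySem.Set.ofList_eq_foldl, PySem.Set.ofList_eq_foldl]
  exact pvSet_foldl_map aInv b hg l [] hl (by simp)

theorem pvCount_map (aInv b : Int) (hg : Int.gcd aInv 26 = 1) (l : List Char) (k : Char)
    (hl : ∀ y ∈ l, 65 ≤ y.toNat ∧ y.toNat ≤ 90) (hk : 65 ≤ k.toNat ∧ k.toNat ≤ 90) :
    (l.map (pvF aInv b)).count (pvF aInv b k) = l.count k := by
  rw [List.count, List.count, List.countP_map]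
  apply List.countP_congr
  intro x hx
  simp only [Function.comp_apply, beq_iff_eq]
  constructor
  · exact fun h => pvF_inj aInv b hg x k (hl x hx) hk h
  · exact fun h => h ▸ rfl

theorem pvItems_map (aInv b : Int) (hg : Int.gcd aInv 26 = 1) (letters : List Char)
    (hl : ∀ y ∈ letters, 65 ≤ y.toNat ∧ y.toNat ≤ 90) :
    (PySem.Dict.counter (letters.map (pvF aInv b))).items
      = (PySem.Dict.counter letters).items.map (fun q => (pvF aInv b q.1, q.2)) := by
  rw [PySem.Dict.items_counter, PySem.Dict.items_counter,
      pvSet_ofList_map aInv b hg letters hl, List.map_map, List.map_map]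
  apply List.map_congr_left
  intro k hk
  have hkl : k ∈ letters := (PySem.Set.mem_ofList letters k).mp hk
  simp only [Function.comp_apply]
  rw [pvCount_map aInv b hg letters k hl (hl k hkl)]

-- the two per-key loop bodies, named
def pvStepA (ct : List Char) (a : Int) (st : Option (List Char) × Int) (b : Int) : Option (List Char) × Int :=
  let decrypted := pvAffineDecrypt ct a b
  let decLetters := (decrypted.filter (fun c => PySem.Chars.isalpha c)).map PySem.Chars.upperChar
  let freq := PySem.Dict.counter decLetters
  let sortedLetters := (PySem.List.sorted freq.items (fun p => p.2) true).map (·.1)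
  let score : Int := (((sortedLetters.take 6).filter (fun c => pvScoreLetters.contains c)).length : Int)
  if score > st.2 then (some decrypted, score) else st

def pvStepB (items : List (Char × Int)) (p : Int × Int) (st : Option (Int × Int) × Int) (b : Int) : Option (Int × Int) × Int :=
  let mapped := items.map (fun q => (Char.ofNat ((PySem.Int.mod (p.2 * (((q.1.toNat : Int) - 65) - b)) 26).toNat + 65), q.2))
  let mappedS := PySem.List.sorted mapped (fun q => q.2) true
  let score : Int := (((mappedS.take 6).filter (fun q => PySem.Set.contains pvFreqTop q.1)).length : Int)
  if score > st.2 then (some (p.2, b), score) else st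

set_option maxRecDepth 4096 in
theorem pvA_eq (s : String) : affine_break s =
    (if pvLetters s.toList = [] then s else
      String.mk ((pvValidA.foldl
        (fun st a => (PySem.List.pyRange 0 26 1).foldl (pvStepA s.toList a) st)
        ((none : Option (List Char)), (-1 : Int))).1.getD [])) := by
  unfold affine_break pvStepA pvLetters pvAffineDecrypt
  rfl

set_option maxRecDepth 4096 in
theorem pvB_eq (s : String) : affine_break_alt s =
    (if pvLetters s.toList = [] then s else
      match (pvPairsB.foldl
        (fun st p => (PySem.List.pyRange 0 26 1).foldl (pvStepB ((PySem.Dict.counter (pvLetters s.toList)).items) p) st)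
        ((none : Option (Int × Int)), (-1 : Int))).1 with
      | none => s
      | some (aInv, b) => String.mk (pvDecodeB s.toList aInv b)) := by
  unfold affine_break_alt pvStepB pvLetters pvDecodeB
  rfl

theorem pvDecodeB_eq_map (ct : List Char) (aInv b : Int) :
    pvDecodeB ct aInv b = ct.map (pvDecChar aInv b) := rfl

theorem pvAffineDecrypt_eq (ct : List Char) (a b : Int) :
    pvAffineDecrypt ct a b = pvDecodeB ct (pvModInverse a) b := rfl

-- the per-key score computed by A (decrypt, re-count, sort) equals the one computed by B
-- (map the letter counts through the key's permutation, sort)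
theorem pvScore_eq (ct : List Char) (aInv b : Int) (hg : Int.gcd aInv 26 = 1) :
    ((((PySem.List.sorted (PySem.Dict.counter (pvLetters (pvDecodeB ct aInv b))).items (fun p => p.2) true).map (·.1)).take 6).filter
        (fun c => pvScoreLetters.contains c)).length
      = (((PySem.List.sorted ((PySem.Dict.counter (pvLetters ct)).items.map
            (fun q => (Char.ofNat ((PySem.Int.mod (aInv * (((q.1.toNat : Int) - 65) - b)) 26).toNat + 65), q.2))) (fun q => q.2) true).take 6).filter
          (fun q => PySem.Set.contains pvFreqTop q.1)).length := by
  have h1 : pvLetters (pvDecodeB ct aInv b) = (pvLetters ct).map (pvF aInv b) := by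
    rw [pvDecodeB_eq_map]; exact pvDec_letters aInv b ct
  have h2 : (fun q : Char × Int => (Char.ofNat ((PySem.Int.mod (aInv * (((q.1.toNat : Int) - 65) - b)) 26).toNat + 65), q.2))
      = (fun q : Char × Int => (pvF aInv b q.1, q.2)) := rfl
  rw [h1, h2, pvItems_map aInv b hg (pvLetters ct) (pvLetters_up ct)]
  generalize PySem.List.sorted ((PySem.Dict.counter (pvLetters ct)).items.map (fun q => (pvF aInv b q.1, q.2))) (fun q => q.2) true = L
  rw [← List.map_take, List.filter_map, List.length_map]
  congr 1

-- relation between the two loop states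
def pvRel (ct : List Char) (stA : Option (List Char) × Int) (stB : Option (Int × Int) × Int) : Prop :=
  stA.2 = stB.2 ∧ stA.1 = stB.1.map (fun q => pvDecodeB ct q.1 q.2)

theorem pvStep_rel (ct : List Char) (a : Int) (p : Int × Int)
    (hp : pvModInverse a = p.2) (hg : Int.gcd p.2 26 = 1)
    (stA : Option (List Char) × Int) (stB : Option (Int × Int) × Int)
    (hrel : pvRel ct stA stB) (b : Int) :
    pvRel ct (pvStepA ct a stA b) (pvStepB ((PySem.Dict.counter (pvLetters ct)).items) p stB b) := by
  obtain ⟨h2, h1⟩ := hrel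
  unfold pvStepA pvStepB
  have hdec : pvAffineDecrypt ct a b = pvDecodeB ct p.2 b := by
    rw [pvAffineDecrypt_eq, hp]
  simp only [hdec]
  have hsc := pvScore_eq ct p.2 b hg
  have hLetters : ((pvDecodeB ct p.2 b).filter (fun c => PySem.Chars.isalpha c)).map PySem.Chars.upperChar
      = pvLetters (pvDecodeB ct p.2 b) := rfl
  rw [hLetters, hsc, h2]
  by_cases hc : ((((PySem.List.sorted ((PySem.Dict.counter (pvLetters ct)).items.map
        (fun q => (Char.ofNat ((PySem.Int.mod (p.2 * (((q.1.toNat : Int) - 65) - b)) 26).toNat + 65), q.2))) (fun q => q.2) true).take 6).filter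
      (fun q => PySem.Set.contains pvFreqTop q.1)).length : Int) > stB.2
  · rw [if_pos hc, if_pos hc]; exact ⟨rfl, rfl⟩
  · rw [if_neg hc, if_neg hc]; exact ⟨h2, h1⟩

theorem pvInner_rel (ct : List Char) (a : Int) (p : Int × Int)
    (hp : pvModInverse a = p.2) (hg : Int.gcd p.2 26 = 1) :
    ∀ (bs : List Int) (stA : Option (List Char) × Int) (stB : Option (Int × Int) × Int),
    pvRel ct stA stB →
    pvRel ct (bs.foldl (pvStepA ct a) stA) (bs.foldl (pvStepB ((PySem.Dict.counter (pvLetters ct)).items) p) stB)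
  | [], _, _, h => h
  | b :: bs, stA, stB, h => by
    simp only [List.foldl_cons]
    exact pvInner_rel ct a p hp hg bs _ _ (pvStep_rel ct a p hp hg stA stB h b)

theorem pvOuter_rel (ct : List Char) :
    ∀ (ps : List (Int × Int)), (∀ p ∈ ps, pvModInverse p.1 = p.2 ∧ Int.gcd p.2 26 = 1) →
    ∀ (stA : Option (List Char) × Int) (stB : Option (Int × Int) × Int), pvRel ct stA stB →
    pvRel ct
      ((ps.map (·.1)).foldl (fun st a => (PySem.List.pyRange 0 26 1).foldl (pvStepA ct a) st) stA)
      (ps.foldl (fun st p => (PySem.List.pyRange 0 26 1).foldl (pvStepB ((PySem.Dict.counter (pvLetters ct)).items) p) st) stB)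
  | [], _, _, _, h => h
  | p :: ps, hps, stA, stB, h => by
    simp only [List.map_cons, List.foldl_cons]
    have hp := hps p (List.mem_cons_self)
    exact pvOuter_rel ct ps (fun q hq => hps q (List.mem_cons_of_mem _ hq)) _ _
      (pvInner_rel ct p.1 p hp.1 hp.2 _ stA stB h)

theorem pvPairsB_ok : ∀ p ∈ pvPairsB, pvModInverse p.1 = p.2 ∧ Int.gcd p.2 26 = 1 := by decide

theorem pvValidA_eq : pvValidA = pvPairsB.map (·.1) := by decide

-- someness of B's best key
theorem pvStepB_some (items : List (Char × Int)) (p : Int × Int) :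
    ∀ (bs : List Int) (st : Option (Int × Int) × Int), st.1.isSome →
    ((bs.foldl (pvStepB items p) st).1).isSome
  | [], _, h => h
  | b :: bs, st, h => by
    simp only [List.foldl_cons]
    apply pvStepB_some items p bs
    unfold pvStepB
    by_cases hc : (((((PySem.List.sorted (items.map (fun q => (Char.ofNat ((PySem.Int.mod (p.2 * (((q.1.toNat : Int) - 65) - b)) 26).toNat + 65), q.2))) (fun q => q.2) true).take 6).filter (fun q => PySem.Set.contains pvFreqTop q.1)).length : Int)) > st.2
    · rw [if_pos hc]; rfl
    · rw [if_neg hc]; exact h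

theorem pvInnerB_some (items : List (Char × Int)) (p : Int × Int)
    (st : Option (Int × Int) × Int) (h2 : st.2 = -1) :
    (((PySem.List.pyRange 0 26 1).foldl (pvStepB items p) st).1).isSome := by
  have hr : PySem.List.pyRange 0 26 1 = 0 :: PySem.List.pyRange 1 26 1 :=
    PySem.List.pyRange_one_cons (by norm_num)
  rw [hr, List.foldl_cons]
  apply pvStepB_some
  unfold pvStepB
  have hc : (((((PySem.List.sorted (items.map (fun q => (Char.ofNat ((PySem.Int.mod (p.2 * (((q.1.toNat : Int) - 65) - 0)) 26).toNat + 65), q.2))) (fun q => q.2) true).take 6).filter (fun q => PySem.Set.contains pvFreqTop q.1)).length : Int)) > st.2 := by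
    rw [h2]; exact lt_of_lt_of_le (by norm_num : (-1:Int) < 0) (Int.natCast_nonneg _)
  rw [if_pos hc]; rfl

theorem pvOuterB_some (items : List (Char × Int)) :
    ∀ (ps : List (Int × Int)) (st : Option (Int × Int) × Int), st.1.isSome →
    ((ps.foldl (fun st p => (PySem.List.pyRange 0 26 1).foldl (pvStepB items p) st) st).1).isSome
  | [], _, h => h
  | p :: ps, st, h => by
    simp only [List.foldl_cons]
    exact pvOuterB_some items ps _ (pvStepB_some items p _ st h)

theorem pvB_some (items : List (Char × Int)) :
    ((pvPairsB.foldl (fun st p => (PySem.List.pyRange 0 26 1).foldl (pvStepB items p) st)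
      ((none : Option (Int × Int)), (-1 : Int))).1).isSome := by
  show ((((1,1) :: pvPairsB.tail).foldl (fun st p => (PySem.List.pyRange 0 26 1).foldl (pvStepB items p) st)
      ((none : Option (Int × Int)), (-1 : Int))).1).isSome
  rw [List.foldl_cons]
  exact pvOuterB_some items _ _ (pvInnerB_some items _ _ rfl)

theorem pvMain (s : String) : affine_break s = affine_break_alt s := by
  rw [pvA_eq, pvB_eq]
  by_cases h : pvLetters s.toList = []
  · rw [if_pos h, if_pos h]
  · rw [if_neg h, if_neg h]
    have hrel := pvOuter_rel s.toList pvPairsB pvPairsB_ok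
      ((none : Option (List Char)), (-1 : Int)) ((none : Option (Int × Int)), (-1 : Int))
      ⟨rfl, rfl⟩
    have hsome := pvB_some ((PySem.Dict.counter (pvLetters s.toList)).items)
    set stB := pvPairsB.foldl
      (fun st p => (PySem.List.pyRange 0 26 1).foldl (pvStepB ((PySem.Dict.counter (pvLetters s.toList)).items) p) st)
      ((none : Option (Int × Int)), (-1 : Int)) with hstB
    obtain ⟨q, hq⟩ := Option.isSome_iff_exists.mp hsome
    rw [pvValidA_eq]
    have h1 := hrel.2
    rw [hq] at h1 ⊢
    obtain ⟨aInv, b⟩ := q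
    simp only [Option.map_some] at h1
    rw [h1]
    rfl

-- ===== VERDICT (by name: the statement is the Claim_ definition above) =====
theorem affine_break_spec : Claim_equal_affine_break := by
  intro ciphertext _
  exact pvMain ciphertext
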